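-- pv_equiv track=rewrite | github.com/ShaoDevon/Genome_Read-Mapping | genome_read_sequencing.py | make_minimizer_table
-- ===== SOURCE A (Python) =====
-- def make_minimizer_table(ref_genome, kmer_length, minimizer_length):
--     minimizer_table = {}  # Define output table, should be a dictionary with keys = string of minimizer sequence and values = all positions of those sequences in ref_genome
--     for outer_kmer_start_pos in range(len(ref_genome)-kmer_length + 1):  # Iterate through all k-mers of ref_genome
--         inner_kmers = {}
--         current_outer_kmer = ref_genome[outer_kmer_start_pos:outer_kmer_start_pos+kmer_length]
--         for inner_kmer_start_pos in range(kmer_length - minimizer_length + 1):    # Iterate through all k-mers of the current k-mer, adding each to a list and then sorting the list to take the smallest value as the minimizer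
--             inner_kmers[current_outer_kmer[inner_kmer_start_pos:inner_kmer_start_pos + minimizer_length]] = inner_kmer_start_pos + outer_kmer_start_pos
--         sorted_inner_kmers = sorted(inner_kmers.keys())
--         minimizer = sorted_inner_kmers[0]
--         if minimizer in minimizer_table:
--             if inner_kmers[minimizer] not in minimizer_table[minimizer]:
--                 minimizer_table[minimizer].append(inner_kmers[minimizer])
--         else:
--             minimizer_table[minimizer] = [inner_kmers[minimizer]]
--     return(minimizer_table)
-- ===== SOURCE B (Python) =====
-- def make_minimizer_table(ref_genome, kmer_length, minimizer_length):
--     # Per window: single running-minimum scan (ties -> later position) instead of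
--     # building a dict of m-mers and sorting its keys.
--     table = {}
--     for p in range(len(ref_genome) - kmer_length + 1):
--         window = ref_genome[p:p + kmer_length]
--         best = window[0:minimizer_length]
--         pos = p
--         for i in range(1, kmer_length - minimizer_length + 1):
--             mm = window[i:i + minimizer_length]
--             if mm <= best:
--                 best = mm
--                 pos = i + p
--         if best in table:
--             if pos not in table[best]:
--                 table[best].append(pos)
--         else:
--             table[best] = [pos]
--     return table
-- ===== Notes on version B (the rewrite author's own statement) =====
-- stated objective: alternative
-- what changed: Per window, A builds a dict of all m-mers, sorts its keys and looks the minimizer back up; B finds the minimizer in one running-minimum scan of the window (ties move to the later position), with no dict and no sort.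
import Mathlib
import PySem

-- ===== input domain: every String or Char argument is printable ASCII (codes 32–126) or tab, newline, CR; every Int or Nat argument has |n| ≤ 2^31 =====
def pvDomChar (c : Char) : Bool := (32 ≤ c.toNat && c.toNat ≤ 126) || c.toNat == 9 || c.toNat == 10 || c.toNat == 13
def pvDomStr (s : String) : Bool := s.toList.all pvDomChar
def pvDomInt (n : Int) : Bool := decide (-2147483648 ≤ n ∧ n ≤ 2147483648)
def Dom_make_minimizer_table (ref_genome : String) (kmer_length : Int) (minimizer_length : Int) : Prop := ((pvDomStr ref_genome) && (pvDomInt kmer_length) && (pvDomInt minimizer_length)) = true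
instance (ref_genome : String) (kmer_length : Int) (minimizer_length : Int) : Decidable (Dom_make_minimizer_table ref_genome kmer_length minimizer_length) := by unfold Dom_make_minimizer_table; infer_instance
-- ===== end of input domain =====

-- B replaces A's per-window "dict of m-mers + sort the keys" by a single running-minimum
-- scan of the window (ties move to the later position): no dict and no sort per window.

-- ===== PORT A =====
-- loop body of A's outer 'for' as a helper (the loop itself is the foldl in make_minimizer_table)
def pvStepA (ref_genome : String) (kmer_length minimizer_length : Int)
    (minimizer_table : PySem.Dict String (List Int)) (outer_kmer_start_pos : Int) :
    PySem.Dict String (List Int) :=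
  let current_outer_kmer := PySem.Str.slice ref_genome (some outer_kmer_start_pos) (some (outer_kmer_start_pos + kmer_length))
  let inner_kmers : PySem.Dict String Int :=
    (PySem.List.pyRange 0 (kmer_length - minimizer_length + 1)).foldl
      (fun d inner_kmer_start_pos =>
        d.insert (PySem.Str.slice current_outer_kmer (some inner_kmer_start_pos) (some (inner_kmer_start_pos + minimizer_length)))
                 (inner_kmer_start_pos + outer_kmer_start_pos))
      PySem.Dict.empty
  let sorted_inner_kmers := PySem.List.sorted inner_kmers.keys (fun s => s) false
  match sorted_inner_kmers with
  | [] => minimizer_table       -- sorted_inner_kmers[0] raises IndexError in Python; Pre_ excludes this case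
  | minimizer :: _ =>
    -- inner_kmers[minimizer] cannot raise: minimizer is one of the dict's keys, so getD is exact
    if minimizer_table.contains minimizer then
      if (minimizer_table.getD minimizer []).contains (inner_kmers.getD minimizer 0) then
        minimizer_table
      else
        minimizer_table.insert minimizer ((minimizer_table.getD minimizer []) ++ [inner_kmers.getD minimizer 0])
    else
      minimizer_table.insert minimizer [inner_kmers.getD minimizer 0]

def make_minimizer_table (ref_genome : String) (kmer_length : Int) (minimizer_length : Int) : List (String × List Int) :=
  ((PySem.List.pyRange 0 (PySem.Str.len ref_genome - kmer_length + 1)).foldl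
    (pvStepA ref_genome kmer_length minimizer_length) PySem.Dict.empty).items

-- ===== PORT B =====
-- loop body of B's outer 'for' as a helper (the loop itself is the foldl in make_minimizer_table_alt)
def pvStepB (ref_genome : String) (kmer_length minimizer_length : Int)
    (table : PySem.Dict String (List Int)) (p : Int) : PySem.Dict String (List Int) :=
  let window := PySem.Str.slice ref_genome (some p) (some (p + kmer_length))
  let bp :=
    (PySem.List.pyRange 1 (kmer_length - minimizer_length + 1)).foldl
      (fun (bp : String × Int) i =>
        let mm := PySem.Str.slice window (some i) (some (i + minimizer_length))
        if mm ≤ bp.1 then (mm, i + p) else bp)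
      (PySem.Str.slice window (some 0) (some minimizer_length), p)
  if table.contains bp.1 then
    if (table.getD bp.1 []).contains bp.2 then table
    else table.insert bp.1 ((table.getD bp.1 []) ++ [bp.2])
  else
    table.insert bp.1 [bp.2]

def make_minimizer_table_alt (ref_genome : String) (kmer_length : Int) (minimizer_length : Int) : List (String × List Int) :=
  ((PySem.List.pyRange 0 (PySem.Str.len ref_genome - kmer_length + 1)).foldl
    (pvStepB ref_genome kmer_length minimizer_length) PySem.Dict.empty).items

-- ===== PRECONDITION & SPEC =====
-- Pre_ excludes exactly the inputs where A raises IndexError (sorted_inner_kmers[0] on an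
-- empty list): the outer loop runs (kmer_length ≤ len) while minimizer_length > kmer_length.
def Pre_make_minimizer_table (ref_genome : String) (kmer_length : Int) (minimizer_length : Int) : Prop :=
  PySem.Str.len ref_genome < kmer_length ∨ minimizer_length ≤ kmer_length
instance (ref_genome : String) (kmer_length : Int) (minimizer_length : Int) : Decidable (Pre_make_minimizer_table ref_genome kmer_length minimizer_length) := by unfold Pre_make_minimizer_table; infer_instance

def pvWitness_make_minimizer_table : String × Int × Int := ("ACGTAC", 4, 2)

def Spec_make_minimizer_table (ref_genome : String) (kmer_length : Int) (minimizer_length : Int) (out : List (String × List Int)) : Prop := out = make_minimizer_table_alt ref_genome kmer_length minimizer_length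
instance (ref_genome : String) (kmer_length : Int) (minimizer_length : Int) (out : List (String × List Int)) : Decidable (Spec_make_minimizer_table ref_genome kmer_length minimizer_length out) := by unfold Spec_make_minimizer_table; infer_instance

-- ===== CLAIM (what is proved, stated in full; the proofs are below) =====
def Claim_equal_make_minimizer_table : Prop := ∀ (ref_genome : String) (kmer_length : Int) (minimizer_length : Int), Dom_make_minimizer_table ref_genome kmer_length minimizer_length → Pre_make_minimizer_table ref_genome kmer_length minimizer_length → Spec_make_minimizer_table ref_genome kmer_length minimizer_length (make_minimizer_table ref_genome kmer_length minimizer_length)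

-- ===== LEMMAS AND PROOFS =====

-- the dict A builds from a list of (key, value) insertions
def pvDictOf (xs : List (String × Int)) : PySem.Dict String Int :=
  xs.foldl (fun d sv => d.insert sv.1 sv.2) PySem.Dict.empty

-- B's running-minimum fold
def pvBest (x : String × Int) (t : List (String × Int)) : String × Int :=
  t.foldl (fun bp sv => if sv.1 ≤ bp.1 then sv else bp) x

-- head of Python's sorted(l) is a member that is ≤ every element
lemma pvSortedHead (l : List String) (h : l ≠ []) :
    ∃ mn r, PySem.List.sorted l (fun s => s) false = mn :: r ∧ mn ∈ l ∧ ∀ y ∈ l, mn ≤ y := by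
  cases hs : PySem.List.sorted l (fun s => s) false with
  | nil => exact absurd ((PySem.List.sorted_eq_nil_iff l _ false).mp hs) h
  | cons mn r =>
    refine ⟨mn, r, rfl, ?_, ?_⟩
    · have : mn ∈ PySem.List.sorted l (fun s => s) false := by rw [hs]; exact List.mem_cons_self
      exact (PySem.List.mem_sorted l _ false mn).mp this
    · exact PySem.List.key_head_sorted_le l (fun s => s) hs

-- CORE: for a nonempty insertion list, "first key of sorted(dict.keys)" together with the
-- dict's value there is exactly B's running-minimum fold (ties go to the later insertion).
lemma pvCore (x : String × Int) (t : List (String × Int)) :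
    ∃ r, PySem.List.sorted (pvDictOf (x :: t)).keys (fun s => s) false = (pvBest x t).1 :: r ∧
      (pvDictOf (x :: t)).getD (pvBest x t).1 0 = (pvBest x t).2 := by
  induction t using List.reverseRecOn with
  | nil =>
    have hk : (pvDictOf [x]).keys = [x.1] := by
      simp [pvDictOf, PySem.Dict.keys_insert_of_not_contains, PySem.Dict.keys_empty,
            PySem.Dict.contains_empty]
    refine ⟨[], ?_, ?_⟩
    · rw [pvBest, List.foldl_nil, hk]
      exact PySem.List.sorted_eq_self_of_pairwise _ _ (List.pairwise_singleton _ _)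
    · simp [pvDictOf, pvBest]
  | append_singleton t' sv ih =>
    obtain ⟨r, hs, hg⟩ := ih
    have hmem_b : (pvBest x t').1 ∈ (pvDictOf (x :: t')).keys := by
      have : (pvBest x t').1 ∈ PySem.List.sorted (pvDictOf (x :: t')).keys (fun s => s) false := by
        rw [hs]; exact List.mem_cons_self
      exact (PySem.List.mem_sorted _ _ false _).mp this
    have hmin_b : ∀ y ∈ (pvDictOf (x :: t')).keys, (pvBest x t').1 ≤ y :=
      PySem.List.key_head_sorted_le _ (fun s => s) hs
    have hd' : pvDictOf (x :: (t' ++ [sv])) = (pvDictOf (x :: t')).insert sv.1 sv.2 := by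
      show pvDictOf ((x :: t') ++ [sv]) = _
      simp [pvDictOf]
    have hb' : pvBest x (t' ++ [sv]) =
        if sv.1 ≤ (pvBest x t').1 then sv else pvBest x t' := by
      simp [pvBest]
    have hne : (pvDictOf (x :: (t' ++ [sv]))).keys ≠ [] := by
      have : sv.1 ∈ (pvDictOf (x :: (t' ++ [sv]))).keys := by
        rw [hd']
        exact (PySem.Dict.mem_keys_insert _ _ _ _).mpr (Or.inl rfl)
      exact List.ne_nil_of_mem this
    obtain ⟨mn, r', hs', hmem', hmin'⟩ := pvSortedHead _ hne
    have hkeys : ∀ y, y ∈ (pvDictOf (x :: (t' ++ [sv]))).keys ↔ y = sv.1 ∨ y ∈ (pvDictOf (x :: t')).keys := by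
      intro y; rw [hd']; exact PySem.Dict.mem_keys_insert _ _ _ _
    by_cases hle : sv.1 ≤ (pvBest x t').1
    · have hmn : mn = sv.1 := by
        apply le_antisymm
        · exact hmin' sv.1 ((hkeys sv.1).mpr (Or.inl rfl))
        · rcases (hkeys mn).mp hmem' with h | h
          · exact le_of_eq h.symm
          · exact le_trans hle (hmin_b mn h)
      refine ⟨r', ?_, ?_⟩
      · rw [hb', if_pos hle, ← hmn, hs']
      · rw [hb', if_pos hle, hd', PySem.Dict.getD_insert, if_pos rfl]
    · have hlt : (pvBest x t').1 < sv.1 := lt_of_not_ge hle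
      have hmn : mn = (pvBest x t').1 := by
        apply le_antisymm
        · exact hmin' _ ((hkeys _).mpr (Or.inr hmem_b))
        · rcases (hkeys mn).mp hmem' with h | h
          · rw [h]; exact le_of_lt hlt
          · exact hmin_b mn h
      refine ⟨r', ?_, ?_⟩
      · rw [hb', if_neg hle, ← hmn, hs']
      · rw [hb', if_neg hle, hd', PySem.Dict.getD_insert, if_neg (ne_of_lt hlt), hg]

-- the two loop bodies agree on every window as soon as the inner range is nonempty
lemma pvStep_eq (g : String) (k m : Int) (hmk : m ≤ k) :
    pvStepA g k m = pvStepB g k m := by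
  funext table p
  unfold pvStepA pvStepB
  dsimp only
  rw [PySem.List.pyRange_one_cons (show (0:Int) < k - m + 1 by omega)]
  simp only [zero_add]
  set w := PySem.Str.slice g (some p) (some (p + k)) with hw
  have hdict : List.foldl
      (fun (d : PySem.Dict String Int) i =>
        d.insert (PySem.Str.slice w (some i) (some (i + m))) (i + p))
      PySem.Dict.empty (0 :: PySem.List.pyRange 1 (k - m + 1))
      = pvDictOf ((PySem.Str.slice w (some 0) (some m), p) ::
          (PySem.List.pyRange 1 (k - m + 1)).map
            (fun i => (PySem.Str.slice w (some i) (some (i + m)), i + p))) := by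
    rw [pvDictOf]
    simp only [List.foldl_cons, List.foldl_map, zero_add]
  have hfold : List.foldl
      (fun (bp : String × Int) i =>
        if PySem.Str.slice w (some i) (some (i + m)) ≤ bp.1
        then (PySem.Str.slice w (some i) (some (i + m)), i + p) else bp)
      (PySem.Str.slice w (some 0) (some m), p) (PySem.List.pyRange 1 (k - m + 1))
      = pvBest (PySem.Str.slice w (some 0) (some m), p)
          ((PySem.List.pyRange 1 (k - m + 1)).map
            (fun i => (PySem.Str.slice w (some i) (some (i + m)), i + p))) := by
    rw [pvBest, List.foldl_map]
  obtain ⟨r, hs, hg⟩ := pvCore (PySem.Str.slice w (some 0) (some m), p)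
    ((PySem.List.pyRange 1 (k - m + 1)).map
      (fun i => (PySem.Str.slice w (some i) (some (i + m)), i + p)))
  rw [hdict, hfold, hs]
  dsimp only
  rw [hg]

-- ===== VERDICT (by name: the statement is the Claim_ definition above) =====
theorem make_minimizer_table_spec : Claim_equal_make_minimizer_table := by
  intro g k m _hdom hpre
  unfold Spec_make_minimizer_table make_minimizer_table make_minimizer_table_alt
  by_cases hmk : m ≤ k
  · rw [pvStep_eq g k m hmk]
  · have hlt : PySem.Str.len g < k := hpre.resolve_right hmk
    rw [PySem.List.pyRange_one_eq_nil (by omega)]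
    rfl
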